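-- pv_equiv track=rewrite | github.com/Nizarel/mssql_fastmcp_server | src/utils/validators.py | _has_multiple_statements
-- ===== SOURCE A (Python) =====
-- def _has_multiple_statements(query: str) -> bool:
--     """Check if query contains multiple statements."""
--     # Simple check for semicolons outside of strings
--     in_string = False
--     string_char = None
--
--     for i, char in enumerate(query):
--         if char in ("'", '"') and (i == 0 or query[i-1] != '\\'):
--             if not in_string:
--                 in_string = True
--                 string_char = char
--             elif char == string_char:
--                 in_string = False
--         elif char == ';' and not in_string:
--             # Check if there's non-whitespace after the semicolon
--             remainder = query[i+1:].strip()
--             if remainder: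
--                 return True
--
--     return False
-- ===== SOURCE B (Python) =====
-- def _has_multiple_statements(query: str) -> bool:
--     """Check if query contains multiple statements."""
--     # Stage 1: collect positions of semicolons outside strings.
--     bare = []
--     in_string = False
--     string_char = None
--     for i, char in enumerate(query):
--         if char in ("'", '"') and (i == 0 or query[i-1] != '\\'):
--             if not in_string:
--                 in_string = True
--                 string_char = char
--             elif char == string_char:
--                 in_string = False
--         elif char == ';' and not in_string:
--             bare.append(i)
--     # Stage 2: position of the last non-whitespace character (-1 if none).
--     last = -1
--     for i, char in enumerate(query):
--         if not char.isspace():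
--             last = i
--     # Multiple statements iff some bare semicolon has non-whitespace after it.
--     return any(i < last for i in bare)
-- ===== Notes on version B (the rewrite author's own statement) =====
-- stated objective: alternative
-- what changed: B replaces A's per-semicolon tail slicing and stripping by two staged passes plus a final any(): it first collects the positions of semicolons outside strings, then computes the index of the last non-whitespace character, and reports True iff some collected position lies before it.
import Mathlib
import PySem

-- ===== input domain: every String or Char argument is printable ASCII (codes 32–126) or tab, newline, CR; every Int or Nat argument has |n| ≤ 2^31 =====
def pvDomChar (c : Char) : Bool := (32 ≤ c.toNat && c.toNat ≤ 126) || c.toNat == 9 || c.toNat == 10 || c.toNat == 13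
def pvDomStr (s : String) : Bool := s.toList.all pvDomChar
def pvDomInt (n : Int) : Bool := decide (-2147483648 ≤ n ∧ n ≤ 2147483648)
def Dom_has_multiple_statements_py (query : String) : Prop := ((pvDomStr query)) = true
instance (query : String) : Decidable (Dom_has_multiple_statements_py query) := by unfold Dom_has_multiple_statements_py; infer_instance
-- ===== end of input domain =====

-- B stages the work (collect bare-semicolon positions, compute the last non-whitespace index, compare) instead of A's per-semicolon tail slicing (alternative decomposition).

-- ===== PORT A =====
-- loop over the characters; `prev` is query[i-1] (none at i = 0); at a bare ';' A slices
-- the remainder and strips it ('remainder = query[i+1:].strip()' → PySem.Chars.strip rest)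
def hmsALoop (prev : Option Char) (in_string : Bool) (string_char : Option Char) :
    List Char → Bool
  | [] => false
  | c :: rest =>
    if (c = '\'' ∨ c = '"') ∧ (prev = none ∨ prev ≠ some '\\') then
      if !in_string then hmsALoop (some c) true (some c) rest
      else if some c = string_char then hmsALoop (some c) false string_char rest
      else hmsALoop (some c) in_string string_char rest
    else if c = ';' ∧ !in_string then
      if PySem.Chars.strip rest ≠ [] then true
      else hmsALoop (some c) in_string string_char rest
    else hmsALoop (some c) in_string string_char rest

def has_multiple_statements_py (query : String) : Bool :=
  hmsALoop none false none query.toList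

-- ===== PORT B =====
-- stage 1 of Source B: the list `bare` of indices of semicolons outside strings
-- (`prev` is query[i-1], none at i = 0, as in the Python's `i == 0 or query[i-1] != '\\'`)
def hmsBare (prev : Option Char) (in_string : Bool) (string_char : Option Char) (i : Nat) :
    List Char → List Nat
  | [] => []
  | c :: rest =>
    if (c = '\'' ∨ c = '"') ∧ (prev = none ∨ prev ≠ some '\\') then
      if !in_string then hmsBare (some c) true (some c) (i + 1) rest
      else if some c = string_char then hmsBare (some c) false string_char (i + 1) rest
      else hmsBare (some c) in_string string_char (i + 1) rest
    else if c = ';' ∧ !in_string then i :: hmsBare (some c) in_string string_char (i + 1) rest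
    else hmsBare (some c) in_string string_char (i + 1) rest

-- stage 2 of Source B: `last = -1; for i, char in enumerate(query): if not char.isspace(): last = i`
def hmsLast : Nat → Int → List Char → Int
  | _, last, [] => last
  | i, last, c :: rest =>
      hmsLast (i + 1) (if ¬ PySem.Chars.isspace c then (i : Int) else last) rest

def has_multiple_statements_py_alt (query : String) : Bool :=
  let bare := hmsBare none false none 0 query.toList
  let last := hmsLast 0 (-1) query.toList
  bare.any (fun i => decide ((i : Int) < last))

-- ===== PRECONDITION & SPEC =====
def Spec_has_multiple_statements_py (query : String) (out : Bool) : Prop := out = has_multiple_statements_py_alt query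
instance (query : String) (out : Bool) : Decidable (Spec_has_multiple_statements_py query out) := by unfold Spec_has_multiple_statements_py; infer_instance

-- ===== CLAIM (what is proved, stated in full; the proofs are below) =====
def Claim_equal_has_multiple_statements_py : Prop := ∀ (query : String), Dom_has_multiple_statements_py query → Spec_has_multiple_statements_py query (has_multiple_statements_py query)

-- ===== LEMMAS AND PROOFS =====

theorem hms_strip_eq_nil_iff (cs : List Char) :
    PySem.Chars.strip cs = [] ↔ ∀ x ∈ cs, PySem.Chars.isspace x := by
  show (((cs.dropWhile PySem.Chars.isspace).reverse.dropWhile PySem.Chars.isspace)).reverse = [] ↔ _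
  rw [List.reverse_eq_nil_iff, List.dropWhile_eq_nil_iff]
  simp only [List.mem_reverse]
  constructor
  · intro h x hx
    have := List.takeWhile_append_dropWhile (p := PySem.Chars.isspace) (l := cs)
    rw [← this] at hx
    rcases List.mem_append.mp hx with h1 | h2
    · exact List.mem_takeWhile_imp h1
    · exact h x h2
  · intro h x hx
    exact h x ((List.dropWhile_suffix _).subset hx)

theorem hms_not_space_quote : PySem.Chars.isspace '\'' = false ∧ PySem.Chars.isspace '"' = false
    ∧ PySem.Chars.isspace ';' = false := by decide

theorem hmsALoop_all_space (rest : List Char) (h : ∀ x ∈ rest, PySem.Chars.isspace x)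
    (prev : Option Char) (in_string : Bool) (string_char : Option Char) :
    hmsALoop prev in_string string_char rest = false := by
  induction rest generalizing prev in_string string_char with
  | nil => rfl
  | cons c rest ih =>
    have hc : PySem.Chars.isspace c := h c (List.mem_cons_self)
    have hq : ¬ (c = '\'' ∨ c = '"') := by
      rintro (rfl | rfl) <;> simp_all [hms_not_space_quote.1, hms_not_space_quote.2.1]
    have hs : ¬ c = ';' := by rintro rfl; simp_all [hms_not_space_quote.2.2]
    rw [hmsALoop]
    simp only [hq, false_and, if_false, hs]
    exact ih (fun x hx => h x (List.mem_cons_of_mem _ hx)) _ _ _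

theorem hmsBare_all_space (rest : List Char) (h : ∀ x ∈ rest, PySem.Chars.isspace x)
    (prev : Option Char) (in_string : Bool) (string_char : Option Char) (i : Nat) :
    hmsBare prev in_string string_char i rest = [] := by
  induction rest generalizing prev in_string string_char i with
  | nil => rfl
  | cons c rest ih =>
    have hc : PySem.Chars.isspace c := h c (List.mem_cons_self)
    have hq : ¬ (c = '\'' ∨ c = '"') := by
      rintro (rfl | rfl) <;> simp_all [hms_not_space_quote.1, hms_not_space_quote.2.1]
    have hs : ¬ c = ';' := by rintro rfl; simp_all [hms_not_space_quote.2.2]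
    rw [hmsBare]
    simp only [hq, false_and, if_false, hs]
    exact ih (fun x hx => h x (List.mem_cons_of_mem _ hx)) _ _ _ _

-- index of the last non-whitespace character (proof-only helper)
def hmsLastNS : List Char → Option Nat
  | [] => none
  | c :: rest =>
    match hmsLastNS rest with
    | some j => some (j + 1)
    | none => if ¬ PySem.Chars.isspace c then some 0 else none

theorem hmsLast_eq (rest : List Char) : ∀ (i : Nat) (last : Int),
    hmsLast i last rest =
      (match hmsLastNS rest with
       | some j => ((i + j : Nat) : Int)
       | none => last) := by
  induction rest with
  | nil => intro i last; rfl
  | cons c rest ih =>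
    intro i last
    rw [hmsLast, ih, hmsLastNS]
    cases h : hmsLastNS rest with
    | some j =>
      simp only []
      congr 1
      omega
    | none =>
      by_cases hc : PySem.Chars.isspace c <;> simp [hc]

theorem hms_exists_drop (rest : List Char) : ∀ (m : Nat),
    (∃ x ∈ rest.drop m, ¬ PySem.Chars.isspace x) ↔
      (∃ j, hmsLastNS rest = some j ∧ m ≤ j) := by
  induction rest with
  | nil => intro m; simp [hmsLastNS]
  | cons c rest ih =>
    intro m
    cases m with
    | zero =>
      simp only [List.drop_zero]
      rw [hmsLastNS]
      cases h : hmsLastNS rest with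
      | some j =>
        have := (ih 0).mpr ⟨j, h, Nat.zero_le _⟩
        simp only [List.drop_zero] at this
        obtain ⟨x, hx, hxs⟩ := this
        simp only []
        constructor
        · intro _; exact ⟨j + 1, rfl, Nat.zero_le _⟩
        · intro _; exact ⟨x, List.mem_cons_of_mem _ hx, hxs⟩
      | none =>
        have hrest : ¬ ∃ x ∈ rest, ¬ PySem.Chars.isspace x := by
          intro hex
          obtain ⟨j, hj, _⟩ := (ih 0).mp (by simpa using hex)
          simp [h] at hj
        by_cases hc : PySem.Chars.isspace c
        · simp only [hc, not_true_eq_false, if_false]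
          constructor
          · rintro ⟨x, hx, hxs⟩
            rcases List.mem_cons.mp hx with rfl | hx'
            · exact absurd hc hxs
            · exact absurd ⟨x, hx', hxs⟩ hrest
          · rintro ⟨j, hj, _⟩; exact absurd hj (by simp)
        · simp only [hc]
          exact ⟨fun _ => ⟨0, rfl, le_refl _⟩, fun _ => ⟨c, List.mem_cons_self, hc⟩⟩
    | succ m =>
      rw [List.drop_succ_cons, ih m, hmsLastNS]
      cases h : hmsLastNS rest with
      | some j =>
        constructor
        · rintro ⟨j', hj', hm⟩
          cases hj'; exact ⟨j + 1, rfl, by omega⟩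
        · rintro ⟨j', hj', hm⟩
          simp only [Option.some.injEq] at hj'
          exact ⟨j, rfl, by omega⟩
      | none =>
        constructor
        · rintro ⟨j', hj', _⟩; cases hj'
        · rintro ⟨j', hj', hm⟩
          by_cases hc : PySem.Chars.isspace c
          · simp [hc] at hj'
          · simp [hc] at hj'; omega

theorem hms_H (cs : List Char) (k : Nat) :
    PySem.Chars.strip (cs.drop (k + 1)) ≠ [] ↔ ((k : Int) < hmsLast 0 (-1) cs) := by
  rw [hmsLast_eq]
  have h1 : PySem.Chars.strip (cs.drop (k + 1)) ≠ [] ↔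
      ∃ x ∈ cs.drop (k + 1), ¬ PySem.Chars.isspace x := by
    rw [Ne, hms_strip_eq_nil_iff]
    push_neg
    rfl
  rw [h1, hms_exists_drop]
  cases h : hmsLastNS cs with
  | some j =>
    simp only [Option.some.injEq, Nat.zero_add]
    constructor
    · rintro ⟨j', rfl, hm⟩; omega
    · intro hk
      refine ⟨j, rfl, ?_⟩
      push_cast at hk
      omega
  | none =>
    constructor
    · rintro ⟨j', hj', _⟩; cases hj'
    · intro hk
      have hk' : (k : Int) < -1 := hk
      omega

theorem hms_main (rest : List Char) :
    ∀ (prev : Option Char) (in_string : Bool) (string_char : Option Char) (i : Nat) (last : Int),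
    (∀ k : Nat, PySem.Chars.strip (rest.drop (k + 1)) ≠ [] ↔ ((i : Int) + k < last)) →
    hmsALoop prev in_string string_char rest =
      (hmsBare prev in_string string_char i rest).any (fun j => decide ((j : Int) < last)) := by
  induction rest with
  | nil => intro _ _ _ _ _ _; rfl
  | cons c rest ih =>
    intro prev in_string string_char i last H
    have H' : ∀ k : Nat, PySem.Chars.strip (rest.drop (k + 1)) ≠ [] ↔
        (((i + 1 : Nat) : Int) + k < last) := by
      intro k
      have := H (k + 1)
      rw [List.drop_succ_cons] at this
      rw [this]
      constructor <;> intro <;> push_cast at * <;> omega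
    rw [hmsALoop, hmsBare]
    by_cases hq : (c = '\'' ∨ c = '"') ∧ (prev = none ∨ prev ≠ some '\\')
    · rw [if_pos hq, if_pos hq]
      by_cases h1 : (!in_string) = true
      · rw [if_pos h1, if_pos h1]; exact ih _ _ _ _ _ H'
      · rw [if_neg h1, if_neg h1]
        by_cases h2 : some c = string_char
        · rw [if_pos h2, if_pos h2]; exact ih _ _ _ _ _ H'
        · rw [if_neg h2, if_neg h2]; exact ih _ _ _ _ _ H'
    · rw [if_neg hq, if_neg hq]
      by_cases hs : c = ';' ∧ (!in_string) = true
      · rw [if_pos hs, if_pos hs, List.any_cons]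
        have H0 := H 0
        rw [List.drop_succ_cons, List.drop_zero] at H0
        by_cases hrem : PySem.Chars.strip rest = []
        · have hall := (hms_strip_eq_nil_iff rest).mp hrem
          have hlt0 : ¬ ((i : Int) + ((0 : Nat) : Int) < last) := fun h => H0.mpr h hrem
          have hlt : ¬ ((i : Int) < last) := by push_cast at hlt0; simpa using hlt0
          rw [if_neg (by simpa using hrem), hmsALoop_all_space rest hall,
            hmsBare_all_space rest hall]
          simp [hlt]
        · rw [if_pos hrem]
          have hlt : (i : Int) < last := by have := H0.mp hrem; push_cast at this; omega
          simp [hlt]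
      · rw [if_neg hs, if_neg hs]; exact ih _ _ _ _ _ H'

-- ===== VERDICT (by name: the statement is the Claim_ definition above) =====
theorem has_multiple_statements_py_spec : Claim_equal_has_multiple_statements_py := by
  intro query _
  unfold Spec_has_multiple_statements_py has_multiple_statements_py has_multiple_statements_py_alt
  exact hms_main _ _ _ _ _ _ (fun k => by simpa using hms_H query.toList k)
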